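-- pv_equiv track=rewrite | github.com/tarilo4ka/LNUpython | prog1.py | deleteElements
-- ===== SOURCE A (Python) =====
-- def isNonDecreaseSorted(arr):
--     for i in range(0, len(arr) - 1):
--         if arr[i] > arr[i + 1]:
--             return False
--     return True
--
-- def isNonIncreaseSorted(arr):
--     for i in range(0, len(arr) - 1):
--         if arr[i] < arr[i + 1]:
--             return False
--     return True
--
-- def deleteElements(arr):
--     if (isNonDecreaseSorted(arr)) or (isNonIncreaseSorted(arr)):
--         return arr
--     else:
--         m = len(arr) // 4
--         for i in range(1, m + 1):
--             arr.pop(4 * i - i)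
--     return arr
-- ===== SOURCE B (Python) =====
-- def deleteElements(arr):
--     # One-pass re-implementation; returns the same value as A but does not
--     # mutate the caller's list (A pops elements from arr in place).
--     nondec = all(x <= y for x, y in zip(arr, arr[1:]))
--     noninc = all(x >= y for x, y in zip(arr, arr[1:]))
--     if nondec or noninc:
--         return arr
--     # keep the first three elements of every complete 4-block
--     out = []
--     i = 0
--     n = len(arr)
--     while i + 4 <= n:
--         out.extend(arr[i:i + 3])
--         i += 4
--     out.extend(arr[i:])
--     return out
-- ===== Notes on version B (the rewrite author's own statement) =====
-- stated objective: alternative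
-- what changed: Replaces A's index-based sortedness loops with pairwise zip checks and A's repeated in-place list.pop calls with a single non-mutating left-to-right pass that keeps the first three elements of every complete 4-block; A mutates its argument, B does not (return value equivalence).
import Mathlib
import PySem

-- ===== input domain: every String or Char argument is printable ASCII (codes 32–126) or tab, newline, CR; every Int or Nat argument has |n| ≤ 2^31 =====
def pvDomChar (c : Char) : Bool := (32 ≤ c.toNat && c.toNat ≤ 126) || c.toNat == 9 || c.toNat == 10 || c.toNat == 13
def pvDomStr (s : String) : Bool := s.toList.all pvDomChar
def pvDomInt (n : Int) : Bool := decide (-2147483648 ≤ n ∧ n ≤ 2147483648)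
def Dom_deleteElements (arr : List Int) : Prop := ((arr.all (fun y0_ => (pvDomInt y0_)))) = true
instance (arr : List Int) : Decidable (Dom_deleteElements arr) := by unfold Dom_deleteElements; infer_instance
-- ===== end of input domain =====

-- B replaces A's index-loop sortedness checks and repeated in-place pops with pairwise zip
-- checks and one left-to-right pass (return value only: A mutates arr in place, B does not).

-- ===== PORT A =====
-- indices read inside the sortedness loops are always in range, so pyGetD's default is never used
def isNonDecreaseSorted (arr : List Int) : Bool :=
  (PySem.List.pyRange 0 ((arr.length : Int) - 1) 1).all
    (fun i => !(decide (PySem.List.pyGetD arr i 0 > PySem.List.pyGetD arr (i + 1) 0)))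

def isNonIncreaseSorted (arr : List Int) : Bool :=
  (PySem.List.pyRange 0 ((arr.length : Int) - 1) 1).all
    (fun i => !(decide (PySem.List.pyGetD arr i 0 < PySem.List.pyGetD arr (i + 1) 0)))

-- one iteration of A's loop: arr.pop(4*i - i); the index is always in range here,
-- so the `none` branch of pop? (Python's IndexError) is unreachable
def pvStep (s : List Int) (i : Int) : List Int :=
  match PySem.List.pop? s (4 * i - i) with
  | some r => r.2
  | none => s

def deleteElements (arr : List Int) : List Int :=
  if isNonDecreaseSorted arr || isNonIncreaseSorted arr then arr
  else
    (PySem.List.pyRange 1 (PySem.Int.floordiv (arr.length : Int) 4 + 1) 1).foldl pvStep arr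

-- ===== PORT B =====
def pvPairsLe (arr : List Int) : Bool :=
  (arr.zip arr.tail).all (fun p => decide (p.1 ≤ p.2))

def pvPairsGe (arr : List Int) : Bool :=
  (arr.zip arr.tail).all (fun p => decide (p.1 ≥ p.2))

-- the while loop of Source B: keep the first three elements of every complete 4-block
def pvKeep : List Int → List Int
  | a :: b :: c :: _ :: t => a :: b :: c :: pvKeep t
  | l => l

def deleteElements_alt (arr : List Int) : List Int :=
  if pvPairsLe arr || pvPairsGe arr then arr
  else pvKeep arr

-- ===== PRECONDITION & SPEC =====
def Spec_deleteElements (arr : List Int) (out : List Int) : Prop := out = deleteElements_alt arr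
instance (arr : List Int) (out : List Int) : Decidable (Spec_deleteElements arr out) := by unfold Spec_deleteElements; infer_instance

-- ===== CLAIM (what is proved, stated in full; the proofs are below) =====
def Claim_equal_deleteElements : Prop := ∀ (arr : List Int), Dom_deleteElements arr → Spec_deleteElements arr (deleteElements arr)

-- ===== LEMMAS AND PROOFS =====

theorem pyGetD_get (l : List Int) (i : Nat) (h : i < l.length) :
    PySem.List.pyGetD l (i : Int) 0 = l[i] := by
  rw [PySem.List.pyGetD_natCast, List.getD_eq_getElem?_getD, List.getElem?_eq_getElem h]; rfl

theorem pairsLe_iff (l : List Int) : pvPairsLe l = true ↔ List.IsChain (·≤·) l := by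
  induction l with
  | nil => simp [pvPairsLe]
  | cons a t ih =>
    cases t with
    | nil => simp [pvPairsLe]
    | cons b u =>
      simp only [pvPairsLe, List.tail_cons, List.zip_cons_cons, List.all_cons,
        Bool.and_eq_true, decide_eq_true_eq, List.isChain_cons_cons] at *
      tauto

theorem pairsGe_iff (l : List Int) : pvPairsGe l = true ↔ List.IsChain (·≥·) l := by
  induction l with
  | nil => simp [pvPairsGe]
  | cons a t ih =>
    cases t with
    | nil => simp [pvPairsGe]
    | cons b u =>
      simp only [pvPairsGe, List.tail_cons, List.zip_cons_cons, List.all_cons,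
        Bool.and_eq_true, decide_eq_true_eq, List.isChain_cons_cons] at *
      tauto

theorem nondec_iff (l : List Int) :
    isNonDecreaseSorted l = true ↔ ∀ (i : Nat) (h : i + 1 < l.length), l[i]'(by omega) ≤ l[i+1] := by
  unfold isNonDecreaseSorted
  rw [List.all_eq_true]
  constructor
  · intro h i hi
    have hm : (i : Int) ∈ PySem.List.pyRange 0 ((l.length : Int) - 1) 1 := by
      rw [PySem.List.mem_pyRange_one]; omega
    have h2 := h _ hm
    simp only [Bool.not_eq_eq_eq_not, Bool.not_true, decide_eq_false_iff_not, not_lt] at h2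
    rwa [pyGetD_get l i (by omega),
      show ((i : Int) + 1) = ((i+1 : Nat) : Int) by push_cast; ring,
      pyGetD_get l (i+1) hi] at h2
  · intro h x hx
    rw [PySem.List.mem_pyRange_one] at hx
    obtain ⟨i, rfl⟩ : ∃ i : Nat, x = (i : Int) := ⟨x.toNat, by omega⟩
    have hlt : i + 1 < l.length := by omega
    simp only [Bool.not_eq_eq_eq_not, Bool.not_true, decide_eq_false_iff_not, not_lt]
    rw [pyGetD_get l i (by omega),
      show ((i : Int) + 1) = ((i+1 : Nat) : Int) by push_cast; ring,
      pyGetD_get l (i+1) hlt]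
    exact h i hlt

theorem noninc_iff (l : List Int) :
    isNonIncreaseSorted l = true ↔ ∀ (i : Nat) (h : i + 1 < l.length), l[i]'(by omega) ≥ l[i+1] := by
  unfold isNonIncreaseSorted
  rw [List.all_eq_true]
  constructor
  · intro h i hi
    have hm : (i : Int) ∈ PySem.List.pyRange 0 ((l.length : Int) - 1) 1 := by
      rw [PySem.List.mem_pyRange_one]; omega
    have h2 := h _ hm
    simp only [Bool.not_eq_eq_eq_not, Bool.not_true, decide_eq_false_iff_not, not_lt] at h2
    rwa [pyGetD_get l i (by omega),
      show ((i : Int) + 1) = ((i+1 : Nat) : Int) by push_cast; ring,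
      pyGetD_get l (i+1) hi] at h2
  · intro h x hx
    rw [PySem.List.mem_pyRange_one] at hx
    obtain ⟨i, rfl⟩ : ∃ i : Nat, x = (i : Int) := ⟨x.toNat, by omega⟩
    have hlt : i + 1 < l.length := by omega
    simp only [Bool.not_eq_eq_eq_not, Bool.not_true, decide_eq_false_iff_not, not_lt]
    rw [pyGetD_get l i (by omega),
      show ((i : Int) + 1) = ((i+1 : Nat) : Int) by push_cast; ring,
      pyGetD_get l (i+1) hlt]
    exact h i hlt

theorem nondec_eq_pairsLe (arr : List Int) : isNonDecreaseSorted arr = pvPairsLe arr := by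
  rw [Bool.eq_iff_iff, nondec_iff, pairsLe_iff, List.isChain_iff_getElem]

theorem noninc_eq_pairsGe (arr : List Int) : isNonIncreaseSorted arr = pvPairsGe arr := by
  rw [Bool.eq_iff_iff, noninc_iff, pairsGe_iff, List.isChain_iff_getElem]

theorem pvKeep_short (l : List Int) (h : l.length < 4) : pvKeep l = l := by
  match l with
  | [] | [_] | [_, _] | [_, _, _] => rfl
  | _ :: _ :: _ :: _ :: _ => exact absurd h (by simp)

-- A's pop loop, started after j earlier pops (which removed exactly the 4th element of
-- each of the first j blocks, leaving the 3j-element prefix p), pops the 4th element of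
-- each of the next m complete 4-blocks of l.
theorem loop_shift (m : Nat) : ∀ (j : Nat) (p l : List Int), p.length = 3 * j →
    4 * m ≤ l.length → l.length < 4 * m + 4 →
    (PySem.List.pyRange ((j : Int) + 1) ((j : Int) + (m : Int) + 1) 1).foldl pvStep (p ++ l)
      = p ++ pvKeep l := by
  induction m with
  | zero =>
    intro j p l hp h1 h2
    rw [PySem.List.pyRange_one_eq_nil (by push_cast; omega)]
    simp [pvKeep_short l (by omega)]
  | succ m ih =>
    intro j p l hp h1 h2
    match l, h1 with
    | a :: b :: c :: d :: t, h1' =>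
      rw [PySem.List.pyRange_one_cons (by push_cast; omega)]
      simp only [List.foldl_cons]
      have hlen : 3 * j + 3 < (p ++ a :: b :: c :: d :: t).length := by
        simp [hp]
      have hstep : pvStep (p ++ a :: b :: c :: d :: t) ((j : Int) + 1)
          = (p ++ [a, b, c]) ++ t := by
        unfold pvStep
        rw [show 4 * ((j : Int) + 1) - ((j : Int) + 1) = ((3 * j + 3 : Nat) : Int) by push_cast; ring,
          PySem.List.pop?_natCast _ _ hlen]
        have he : (p ++ a :: b :: c :: d :: t).eraseIdx (3 * j + 3)
            = (p ++ [a, b, c]) ++ t := by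
          rw [List.eraseIdx_append_of_length_le (by omega)]
          rw [hp]
          simp
        simp [he]
      rw [hstep,
        show ((j : Int) + 1 + 1) = (((j + 1 : Nat) : Int) + 1) by push_cast; ring,
        show ((j : Int) + ((m + 1 : Nat) : Int) + 1) = (((j + 1 : Nat) : Int) + (m : Int) + 1) by push_cast; ring,
        ih (j + 1) (p ++ [a, b, c]) t (by simp [hp]; omega) (by simp at h1' ⊢; omega)
          (by simp at h2 ⊢; omega)]
      simp [pvKeep]

theorem popLoop_eq_keep (arr : List Int) :
    (PySem.List.pyRange 1 (PySem.Int.floordiv (arr.length : Int) 4 + 1) 1).foldl pvStep arr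
      = pvKeep arr := by
  have h4 : PySem.Int.floordiv (arr.length : Int) 4 = ((arr.length / 4 : Nat) : Int) := by
    rw [show (4 : Int) = ((4 : Nat) : Int) from rfl]
    exact PySem.Int.floordiv_natCast _ _
  rw [h4]
  have := loop_shift (arr.length / 4) 0 [] arr rfl (by omega) (by omega)
  simpa using this

-- ===== VERDICT (by name: the statement is the Claim_ definition above) =====
theorem deleteElements_spec : Claim_equal_deleteElements := by
  intro arr _
  unfold Spec_deleteElements deleteElements deleteElements_alt
  rw [nondec_eq_pairsLe, noninc_eq_pairsGe, popLoop_eq_keep]
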